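-- pv_equiv track=rewrite | github.com/koelling/dnacol | dnacol/dnacol.py | find_column_spans
-- ===== SOURCE A (Python) =====
-- def find_column_spans(line, columns):
--     matches = []
--
--     previous_pos = -1
--     column_number = 0
--     while True:
--         pos = line.find('\t', previous_pos + 1)
--         if pos == -1:
--             break
--
--         column_number += 1
--         if column_number in columns:
--             matches.append( (previous_pos + 1, pos, columns[column_number]) )
--
--         previous_pos = pos
--
--     #last (or only) column in the row
--     column_number += 1
--     if column_number in columns:
--         matches.append( (previous_pos + 1, len(line), columns[column_number]) )
--
--     return matches
-- ===== SOURCE B (Python) =====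
-- def find_column_spans(line, columns):
--     matches = []
--     offset = 0
--     for col, part in enumerate(line.split('\t'), start=1):
--         if col in columns:
--             matches.append((offset, offset + len(part), columns[col]))
--         offset += len(part) + 1
--     return matches
-- ===== Notes on version B (the rewrite author's own statement) =====
-- stated objective: simpler
-- what changed: B replaces A's repeated line.find('\t', prev+1) while-True scan with a single line.split('\t') followed by one enumerate loop that keeps a running byte offset.
import Mathlib
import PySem

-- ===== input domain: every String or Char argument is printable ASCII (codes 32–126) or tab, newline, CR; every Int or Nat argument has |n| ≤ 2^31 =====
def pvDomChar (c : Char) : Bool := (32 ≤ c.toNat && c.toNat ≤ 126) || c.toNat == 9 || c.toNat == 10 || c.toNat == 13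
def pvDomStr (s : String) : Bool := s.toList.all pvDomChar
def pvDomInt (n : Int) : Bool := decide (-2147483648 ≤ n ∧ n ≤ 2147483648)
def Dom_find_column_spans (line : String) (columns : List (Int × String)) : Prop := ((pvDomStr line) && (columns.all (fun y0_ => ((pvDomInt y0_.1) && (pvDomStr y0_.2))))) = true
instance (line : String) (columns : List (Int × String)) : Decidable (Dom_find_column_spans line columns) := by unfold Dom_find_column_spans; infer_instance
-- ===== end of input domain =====

-- B replaces A's repeated line.find('\t', prev+1) while-True scan with a single split('\t')
-- plus one enumerate loop keeping a running byte offset (objective: simpler).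

-- ===== PORT A =====
-- A's `while True` loop: state (previous_pos, column_number, matches); the fuel argument
-- (s.length + 1, strictly more than the number of iterations) only makes it total.
def fcsLoop (s : List Char) (cols : List (Int × String)) :
    Nat → Int → Int → List (Int × Int × String) → Int × Int × List (Int × Int × String)
  | 0, prev, col, acc => (prev, col, acc)
  | fuel+1, prev, col, acc =>
    let pos := PySem.Chars.findFrom s ['\t'] (prev + 1) none
    if pos = -1 then (prev, col, acc)
    else
      fcsLoop s cols fuel pos (col + 1)
        (match List.lookup (col + 1) cols with
         | some v => acc ++ [(prev + 1, pos, v)]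
         | none => acc)

def find_column_spans (line : String) (columns : List (Int × String)) : List (Int × Int × String) :=
  let s := line.toList
  match fcsLoop s columns (s.length + 1) (-1) 0 [] with
  | (prev, col, acc) =>
    -- last (or only) column in the row
    match List.lookup (col + 1) columns with
    | some v => acc ++ [(prev + 1, (s.length : Int), v)]
    | none => acc

-- ===== PORT B =====
-- B's loop body: for (col, part), append a span when col is a key, then step the offset.
def fcsStep (cols : List (Int × String)) (st : List (Int × Int × String) × Int)
    (p : Int × List Char) : List (Int × Int × String) × Int :=
  let matches' := match List.lookup p.1 cols with
    | some v => st.1 ++ [(st.2, st.2 + (p.2.length : Int), v)]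
    | none => st.1
  (matches', st.2 + (p.2.length : Int) + 1)

def find_column_spans_alt (line : String) (columns : List (Int × String)) : List (Int × Int × String) :=
  ((PySem.List.enumerate (line.toList.splitOn '\t') 1).foldl (fcsStep columns) ([], 0)).1

-- ===== PRECONDITION & SPEC =====
def Spec_find_column_spans (line : String) (columns : List (Int × String)) (out : List (Int × Int × String)) : Prop := out = find_column_spans_alt line columns
instance (line : String) (columns : List (Int × String)) (out : List (Int × Int × String)) : Decidable (Spec_find_column_spans line columns out) := by unfold Spec_find_column_spans; infer_instance

-- ===== CLAIM (what is proved, stated in full; the proofs are below) =====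
def Claim_equal_find_column_spans : Prop := ∀ (line : String) (columns : List (Int × String)), Dom_find_column_spans line columns → Spec_find_column_spans line columns (find_column_spans line columns)

-- ===== LEMMAS AND PROOFS =====

-- first occurrence of a character, extracted from PySem.Chars.find's spec
lemma find_char_first {r : List Char} {c : Char} (h : c ∈ r) :
    ∃ j : Nat, PySem.Chars.find r [c] = (j : Int) ∧ j < r.length ∧
      r.take j ++ c :: r.drop (j + 1) = r ∧ c ∉ r.take j := by
  have hinf : [c] <:+: r := (List.singleton_infix_iff c r).mpr h
  have hne : PySem.Chars.find r [c] ≠ -1 := by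
    rw [PySem.Chars.find_ne_neg_one_iff]; exact hinf
  have hle : -1 ≤ PySem.Chars.find r [c] := PySem.Chars.neg_one_le_find r [c]
  have h0 : 0 ≤ PySem.Chars.find r [c] := by omega
  obtain ⟨hpre, hmin⟩ := PySem.Chars.find_spec h0
  set j := (PySem.Chars.find r [c]).toNat with hj
  obtain ⟨t, ht⟩ := hpre
  have hdj : r.drop j = c :: t := by simpa using ht.symm
  have hjlt : j < r.length := by
    by_contra hge
    have : r.drop j = [] := List.drop_eq_nil_of_le (by omega)
    simp [this] at hdj
  refine ⟨j, by omega, hjlt, ?_, ?_⟩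
  · have h1 : r.take j ++ r.drop j = r := List.take_append_drop j r
    have ht' : t = r.drop (j + 1) := by
      have h2 := congrArg (List.drop 1) hdj
      simpa [List.drop_drop, Nat.add_comm] using h2.symm
    rw [hdj, ht'] at h1; exact h1
  · intro hc
    obtain ⟨i, him, hgi⟩ := List.mem_take_iff_getElem.mp hc
    have hij : i < j := by omega
    apply hmin i hij
    exact ⟨r.drop (i+1), by
      simpa [hgi] using (List.getElem_cons_drop (as := r) (i := i) (by omega))⟩

-- the fuel loop of A, followed by A's tail append, equals B's fold over the remaining splits
lemma loop_eq (s : List Char) (cols : List (Int × String)) :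
    ∀ (n fuel k : Nat) (col : Int) (acc : List (Int × Int × String)),
      k ≤ s.length → (s.drop k).length = n → n < fuel →
      (match fcsLoop s cols fuel ((k : Int) - 1) col acc with
       | (prev, col', acc') =>
         match List.lookup (col' + 1) cols with
         | some v => acc' ++ [(prev + 1, (s.length : Int), v)]
         | none => acc') =
      ((PySem.List.enumerate ((s.drop k).splitOn '\t') (col + 1)).foldl (fcsStep cols) (acc, (k : Int))).1 := by
  intro n
  induction n using Nat.strong_induction_on with
  | _ n ih =>
    intro fuel k col acc hk hn hfuel
    obtain ⟨fuel', rfl⟩ : ∃ f, fuel = f + 1 := ⟨fuel - 1, by omega⟩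
    have hcast : ((k : Int) - 1 + 1) = ((k : Nat) : Int) := by ring
    rw [fcsLoop]
    simp only [hcast]
    rw [PySem.Chars.findFrom_natCast s ['\t'] k hk]
    by_cases hmem : '\t' ∈ s.drop k
    · -- a tab is found, at absolute position k + j
      obtain ⟨j, hfind, hjlt, hsplit, hnotin⟩ := find_char_first hmem
      have hfne : PySem.Chars.find (s.drop k) ['\t'] ≠ -1 := by rw [hfind]; omega
      have hsl : s.length = k + (s.drop k).length := by simp [List.length_drop]; omega
      rw [if_neg hfne, hfind]
      rw [if_neg (by omega : ¬ ((k : Int) + (j : Int) = -1))]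
      -- right side: split off the first piece
      have hdd : (s.drop k).drop (j + 1) = s.drop (k + j + 1) := by
        rw [List.drop_drop]
        congr 1
      have hsp : (s.drop k).splitOn '\t' =
          (s.drop k).take j :: (s.drop (k + j + 1)).splitOn '\t' := by
        have h1 : ∀ x ∈ (s.drop k).take j, ¬ (x == '\t') = true := by
          intro x hx hx'
          exact hnotin (by simpa using (beq_iff_eq.mp hx') ▸ hx)
        have h2 := List.splitOnP_first (· == '\t') ((s.drop k).take j) h1 '\t' (by simp)
          ((s.drop k).drop (j + 1))
        conv_lhs => rw [← hsplit]
        simp only [List.splitOn] at h2 ⊢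
        rw [h2, hdd]
      rw [hsp, PySem.List.enumerate_cons, List.foldl_cons]
      have htl : ((s.drop k).take j).length = j := by
        simp [List.length_take]; omega
      -- apply the IH at k' = k + j + 1
      have hrec := ih (s.length - (k + j + 1)) (by omega) fuel' (k + j + 1) (col + 1)
        (match List.lookup (col + 1) cols with
         | some v => acc ++ [((k : Int), (k : Int) + (j : Int), v)]
         | none => acc)
        (by omega) (by simp [List.length_drop]) (by omega)
      have hprev : (((k + j + 1 : Nat) : Int) - 1) = (k : Int) + (j : Int) := by push_cast; ring
      rw [hprev] at hrec
      -- B's first fold step produces exactly the loop's new accumulator and offset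
      have hstep : fcsStep cols (acc, (k : Int)) ((col + 1), (s.drop k).take j)
          = ((match List.lookup (col + 1) cols with
              | some v => acc ++ [((k : Int), (k : Int) + (j : Int), v)]
              | none => acc), ((k + j + 1 : Nat) : Int)) := by
        cases hl : List.lookup (col + 1) cols <;>
          simp [fcsStep, hl, htl]
      rw [hstep]
      exact hrec
    · -- no tab left: the loop exits and A appends the last column
      have hfeq : PySem.Chars.find (s.drop k) ['\t'] = -1 := by
        rw [PySem.Chars.find_eq_neg_one_iff]
        intro hinf
        exact hmem ((List.singleton_infix_iff _ _).mp hinf)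
      rw [if_pos (by rw [hfeq]; simp)]
      have hsp : (s.drop k).splitOn '\t' = [s.drop k] := by
        rw [List.splitOn]
        exact List.splitOnP_eq_single _ _ (fun x hx hx' => hmem ((beq_iff_eq.mp hx') ▸ hx))
      rw [hsp, PySem.List.enumerate_cons, PySem.List.enumerate_nil, List.foldl_cons, List.foldl_nil]
      cases hl : List.lookup (col + 1) cols with
      | none => simp [fcsStep, hl]
      | some v =>
        simp [fcsStep, hl, hcast, List.length_drop]
        omega

-- ===== VERDICT (by name: the statement is the Claim_ definition above) =====
theorem find_column_spans_spec : Claim_equal_find_column_spans := by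
  intro line columns _
  show find_column_spans line columns = find_column_spans_alt line columns
  unfold find_column_spans find_column_spans_alt
  have h := loop_eq line.toList columns line.toList.length (line.toList.length + 1) 0 0 []
    (by omega) (by simp) (by omega)
  simpa using h
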